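-- pv_equiv track=rewrite | github.com/AkaShep/elite-voice-control | core/elite_integration.py | parse_ship_mode
-- ===== SOURCE A (Python) =====
-- def parse_ship_mode(flags: int) -> str:
--     """Определение режима корабля по флагам"""
--     modes = {
--         1 << 0: "Docked",
--         1 << 1: "Landed",
--         1 << 2: "LandingGear",
--         1 << 3: "Shields",
--         1 << 4: "Supercruise",
--         1 << 5: "FlightAssist",
--         1 << 6: "Hardpoints",
--         1 << 7: "Winging",
--         1 << 8: "Lights",
--         1 << 9: "CargoScoop",
--         1 << 10: "SilentRunning",
--         1 << 11: "Scooping",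
--         1 << 12: "SRVHandbrake",
--         1 << 13: "SRVTurret",
--         1 << 14: "SRVUnderShip",
--         1 << 15: "SRVDriveAssist",
--         1 << 16: "FSDMassLocked",
--         1 << 17: "FSDCharging",
--         1 << 18: "FSDCooldown",
--         1 << 19: "LowFuel",
--         1 << 20: "Overheating",
--         1 << 21: "HasLatLong",
--         1 << 22: "InDanger",
--         1 << 23: "InInterdiction",
--         1 << 24: "InMothership",
--         1 << 25: "InFighter",
--         1 << 26: "InSRV",
--         1 << 27: "AnalysisMode",
--         1 << 28: "NightVision"
--     }
--     return next((mode for flag, mode in modes.items() if flags & flag), "Unknown")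
-- ===== SOURCE B (Python) =====
-- _MODE_NAMES = [
--     "Docked", "Landed", "LandingGear", "Shields", "Supercruise",
--     "FlightAssist", "Hardpoints", "Winging", "Lights", "CargoScoop",
--     "SilentRunning", "Scooping", "SRVHandbrake", "SRVTurret", "SRVUnderShip",
--     "SRVDriveAssist", "FSDMassLocked", "FSDCharging", "FSDCooldown", "LowFuel",
--     "Overheating", "HasLatLong", "InDanger", "InInterdiction", "InMothership",
--     "InFighter", "InSRV", "AnalysisMode", "NightVision",
-- ]
--
--
-- def parse_ship_mode(flags: int) -> str:
--     relevant = flags & ((1 << 29) - 1)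
--     if relevant == 0:
--         return "Unknown"
--     lsb = relevant & -relevant
--     return _MODE_NAMES[lsb.bit_length() - 1]
-- ===== Notes on version B (the rewrite author's own statement) =====
-- stated objective: alternative
-- what changed: Replaces the linear scan of a 29-entry dict for the first flag bit with direct bit arithmetic: mask to the low 29 bits, isolate the lowest set bit with relevant & -relevant, and index a name table by its bit_length()-1.
import Mathlib
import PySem

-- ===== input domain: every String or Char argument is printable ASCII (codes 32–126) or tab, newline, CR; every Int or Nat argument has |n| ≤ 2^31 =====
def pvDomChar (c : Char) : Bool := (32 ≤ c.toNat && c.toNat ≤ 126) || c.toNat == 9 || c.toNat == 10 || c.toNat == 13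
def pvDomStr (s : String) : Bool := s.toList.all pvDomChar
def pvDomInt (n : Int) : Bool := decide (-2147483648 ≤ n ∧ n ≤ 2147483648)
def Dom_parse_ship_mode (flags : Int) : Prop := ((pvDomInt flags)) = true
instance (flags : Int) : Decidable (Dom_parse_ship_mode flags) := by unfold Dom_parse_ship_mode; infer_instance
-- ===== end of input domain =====

-- B replaces A's linear scan of a 29-entry dict with bit arithmetic (mask low 29 bits,
-- isolate lowest set bit, index a name table by bit_length()-1); alternative, same cost.


-- ===== PORT A =====
-- the dict literal `modes` (insertion order, distinct keys)
def pvModesDict : PySem.Dict Int String := ⟨[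
  ((1:Int) <<< (0:Nat), "Docked"), ((1:Int) <<< (1:Nat), "Landed"), ((1:Int) <<< (2:Nat), "LandingGear"),
  ((1:Int) <<< (3:Nat), "Shields"), ((1:Int) <<< (4:Nat), "Supercruise"), ((1:Int) <<< (5:Nat), "FlightAssist"),
  ((1:Int) <<< (6:Nat), "Hardpoints"), ((1:Int) <<< (7:Nat), "Winging"), ((1:Int) <<< (8:Nat), "Lights"),
  ((1:Int) <<< (9:Nat), "CargoScoop"), ((1:Int) <<< (10:Nat), "SilentRunning"), ((1:Int) <<< (11:Nat), "Scooping"),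
  ((1:Int) <<< (12:Nat), "SRVHandbrake"), ((1:Int) <<< (13:Nat), "SRVTurret"), ((1:Int) <<< (14:Nat), "SRVUnderShip"),
  ((1:Int) <<< (15:Nat), "SRVDriveAssist"), ((1:Int) <<< (16:Nat), "FSDMassLocked"), ((1:Int) <<< (17:Nat), "FSDCharging"),
  ((1:Int) <<< (18:Nat), "FSDCooldown"), ((1:Int) <<< (19:Nat), "LowFuel"), ((1:Int) <<< (20:Nat), "Overheating"),
  ((1:Int) <<< (21:Nat), "HasLatLong"), ((1:Int) <<< (22:Nat), "InDanger"), ((1:Int) <<< (23:Nat), "InInterdiction"),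
  ((1:Int) <<< (24:Nat), "InMothership"), ((1:Int) <<< (25:Nat), "InFighter"), ((1:Int) <<< (26:Nat), "InSRV"),
  ((1:Int) <<< (27:Nat), "AnalysisMode"), ((1:Int) <<< (28:Nat), "NightVision")]⟩

-- next((mode for flag, mode in modes.items() if flags & flag), "Unknown")
def parse_ship_mode (flags : Int) : String :=
  ((pvModesDict.items.find? (fun p => PySem.Int.band flags p.1 != 0)).map (fun p => p.2)).getD "Unknown"

-- ===== PORT B =====
def pvModeNames : List String := [
  "Docked", "Landed", "LandingGear", "Shields", "Supercruise",
  "FlightAssist", "Hardpoints", "Winging", "Lights", "CargoScoop",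
  "SilentRunning", "Scooping", "SRVHandbrake", "SRVTurret", "SRVUnderShip",
  "SRVDriveAssist", "FSDMassLocked", "FSDCharging", "FSDCooldown", "LowFuel",
  "Overheating", "HasLatLong", "InDanger", "InInterdiction", "InMothership",
  "InFighter", "InSRV", "AnalysisMode", "NightVision"]

def parse_ship_mode_alt (flags : Int) : String :=
  let relevant := PySem.Int.band flags (((1:Int) <<< (29:Nat)) - 1)
  if relevant = 0 then "Unknown"
  else
    let lsb := PySem.Int.band relevant (-relevant)
    -- _MODE_NAMES[lsb.bit_length() - 1]; pyGetD's default only totalises the in-range index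
    PySem.List.pyGetD pvModeNames ((PySem.Int.bitLength lsb : Int) - 1) ""

-- ===== PRECONDITION & SPEC =====
def Spec_parse_ship_mode (flags : Int) (out : String) : Prop := out = parse_ship_mode_alt flags
instance (flags : Int) (out : String) : Decidable (Spec_parse_ship_mode flags out) := by unfold Spec_parse_ship_mode; infer_instance

-- ===== CLAIM (what is proved, stated in full; the proofs are below) =====
def Claim_equal_parse_ship_mode : Prop := ∀ (flags : Int), Dom_parse_ship_mode flags → Spec_parse_ship_mode flags (parse_ship_mode flags)

-- ===== LEMMAS AND PROOFS =====

-- proof-only: the i-th dict entry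
def pvG (i : Nat) : Int × String := ((1:Int) <<< i, pvModeNames.getD i "")

lemma pv_items_eq : pvModesDict.items = (List.range 29).map pvG := by decide

lemma pv_shift_one (i : Nat) : ((1:Int) <<< i) = ((2^i : Nat) : Int) := by
  simp [Int.shiftLeft_eq]

-- low 29 bits of flags, as a Nat
def pvR (flags : Int) : Nat := (PySem.Int.band flags (((1:Int) <<< (29:Nat)) - 1)).toNat

lemma pv_mask_cast : (((1:Int) <<< (29:Nat)) - 1) = ((2^29 - 1 : Nat) : Int) := by
  rw [pv_shift_one]; norm_num

lemma pv_testBit_mask_sub : ∀ (i n x : Nat), x < 2^n → i < n →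
    (2^n - 1 - x).testBit i = !x.testBit i := by
  intro i
  induction i with
  | zero =>
    intro n x hx hn
    obtain ⟨m, rfl⟩ : ∃ m, n = m + 1 := ⟨n - 1, by omega⟩
    have hpow : (2:Nat)^(m+1) = 2 * 2^m := by ring
    have h1 : 1 ≤ (2:Nat)^m := Nat.one_le_two_pow
    simp only [Nat.testBit_zero]
    rcases Nat.mod_two_eq_zero_or_one x with h | h <;> simp [h] <;> omega
  | succ j ih =>
    intro n x hx hn
    obtain ⟨m, rfl⟩ : ∃ m, n = m + 1 := ⟨n - 1, by omega⟩
    rw [Nat.testBit_add_one, Nat.testBit_add_one]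
    have hpow : 2^(m+1) = 2 * 2^m := by ring
    have hdiv : (2^(m+1) - 1 - x) / 2 = 2^m - 1 - x / 2 := by omega
    rw [hdiv]
    exact ih m (x / 2) (by omega) (by omega)

lemma pv_band_branch_pos (a : Int) (ha : 0 ≤ a) (b : Nat) :
    PySem.Int.band a (b : Int) = ((a.toNat &&& b : Nat) : Int) := by
  simp [PySem.Int.band, ha]

lemma pv_band_branch_neg (a : Int) (ha : ¬ 0 ≤ a) (b : Nat) :
    PySem.Int.band a (b : Int) = ((b - (b &&& (-a - 1).toNat) : Nat) : Int) := by
  simp [PySem.Int.band, ha]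

lemma pv_band_mask_eq (flags : Int) :
    PySem.Int.band flags (((1:Int) <<< (29:Nat)) - 1) = ((pvR flags : Nat) : Int) := by
  unfold pvR
  rw [pv_mask_cast]
  by_cases h : 0 ≤ flags
  · rw [pv_band_branch_pos flags h]; simp
  · rw [pv_band_branch_neg flags h]; simp

lemma pv_pvR_lt (flags : Int) : pvR flags < 2^29 := by
  unfold pvR
  rw [pv_mask_cast]
  by_cases h : 0 ≤ flags
  · rw [pv_band_branch_pos flags h, Nat.and_two_pow_sub_one_eq_mod]
    simp only [Int.toNat_natCast]
    exact Nat.mod_lt _ (by norm_num)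
  · rw [pv_band_branch_neg flags h]
    simp
    omega

-- the dict predicate at bit i, for i < 29, reads bit i of pvR
lemma pv_band_bit (flags : Int) (i : Nat) (hi : i < 29) :
    (PySem.Int.band flags ((1:Int) <<< i) ≠ 0) ↔ (pvR flags).testBit i = true := by
  unfold pvR
  rw [pv_shift_one, pv_mask_cast]
  by_cases h : 0 ≤ flags
  · rw [pv_band_branch_pos flags h, pv_band_branch_pos flags h]
    simp only [Int.toNat_natCast, Nat.and_two_pow_sub_one_eq_mod, Nat.testBit_mod_two_pow,
      Int.natCast_ne_zero, Nat.and_two_pow, hi, decide_true, Bool.true_and]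
    cases hb : flags.toNat.testBit i <;> simp [Nat.two_pow_pos i |>.ne']
  · rw [pv_band_branch_neg flags h, pv_band_branch_neg flags h]
    set m := (-flags - 1).toNat with hm
    have hand : 2^i &&& m = (m.testBit i).toNat * 2^i := by
      rw [Nat.land_comm]; exact Nat.and_two_pow m i
    have hmask : 2^29 - 1 &&& m = m % 2^29 := by
      rw [Nat.land_comm]; exact Nat.and_two_pow_sub_one_eq_mod m 29
    rw [hand, hmask]
    have htb : (2^29 - 1 - m % 2^29).testBit i = !m.testBit i := by
      have := pv_testBit_mask_sub i 29 (m % 2^29) (Nat.mod_lt _ (by norm_num)) hi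
      rw [this, Nat.testBit_mod_two_pow]
      simp [hi]
    simp only [Int.toNat_natCast, htb, Int.natCast_ne_zero]
    cases hb : m.testBit i <;> simp [hb, Nat.two_pow_pos i |>.ne', Nat.one_le_two_pow]

-- find? over range: first index where q holds
lemma pv_find?_range : ∀ (n : Nat) (q : Nat → Bool) (k : Nat), k < n →
    (∀ j, j < k → q j = false) → q k = true → (List.range n).find? q = some k := by
  intro n
  induction n with
  | zero => intro q k hk; omega
  | succ n ih =>
    intro q k hk hmin hq
    rw [List.range_succ_eq_map]
    cases k with
    | zero => simp [List.find?_cons, hq]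
    | succ k =>
      have h0 : q 0 = false := hmin 0 (by omega)
      rw [List.find?_cons, h0]
      simp only [Bool.false_eq_true, if_false, List.find?_map]
      have hcomp : q ∘ Nat.succ = fun j => q (j+1) := rfl
      have : List.find? (q ∘ Nat.succ) (List.range n) = some k := by
        rw [hcomp]
        exact ih _ k (by omega) (fun j hj => hmin (j+1) (by omega)) hq
      simp [this]

lemma pv_bitLength_two_pow (k : Nat) : PySem.Int.bitLength ((2^k : Nat) : Int) = k + 1 := by
  have h1 := PySem.Int.lt_two_pow_bitLength ((2^k : Nat) : Int)
  have h2 := PySem.Int.two_pow_bitLength_le ((2^k : Nat) : Int) (by positivity)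
  rw [Int.natAbs_natCast] at h1 h2
  have hk1 : k < PySem.Int.bitLength ((2^k : Nat) : Int) :=
    (Nat.pow_lt_pow_iff_right (by norm_num)).mp h1
  have hk2 : PySem.Int.bitLength ((2^k : Nat) : Int) - 1 ≤ k :=
    (Nat.pow_le_pow_iff_right (by norm_num)).mp h2
  omega

-- lowest set bit: r & (r-1) clears it
lemma pv_and_pred (k m' : Nat) :
    (2^(k+1) * m' + 2^k) &&& (2^(k+1) * m' + 2^k - 1) = 2^(k+1) * m' := by
  have hb : (2:Nat)^k < 2^(k+1) := Nat.pow_lt_pow_succ (by norm_num)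
  have hsub : 2^(k+1) * m' + 2^k - 1 = 2^(k+1) * m' + (2^k - 1) := by
    have : 1 ≤ (2:Nat)^k := Nat.one_le_two_pow
    omega
  apply Nat.eq_of_testBit_eq
  intro j
  rw [Nat.testBit_land, hsub,
      Nat.testBit_two_pow_mul_add m' hb j,
      Nat.testBit_two_pow_mul_add m' (by omega : 2^k - 1 < 2^(k+1)) j]
  have hm0 : (2:Nat)^(k+1) * m' = 2^(k+1) * m' + 0 := by omega
  rw [hm0, Nat.testBit_two_pow_mul_add m' (Nat.two_pow_pos (k+1)) j]
  by_cases hj : j < k + 1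
  · simp only [hj, if_pos]
    rw [Nat.testBit_two_pow, Nat.testBit_two_pow_sub_one]
    simp only [Nat.zero_testBit]
    by_cases hjk : j = k <;> simp [hjk] <;> omega
  · simp [hj]

-- ===== VERDICT (by name: the statement is the Claim_ definition above) =====
lemma pv_band_branch_mixed (a : Nat) (b : Int) (hb : ¬ 0 ≤ b) :
    PySem.Int.band (a : Int) b = ((a - (a &&& (-b - 1).toNat) : Nat) : Int) := by
  simp [PySem.Int.band, hb]

-- A's value when no bit below 29 is set
lemma pv_A_none (flags : Int) (h0 : pvR flags = 0) : parse_ship_mode flags = "Unknown" := by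
  unfold parse_ship_mode
  rw [pv_items_eq, List.find?_map]
  have hnone : List.find? ((fun p => PySem.Int.band flags p.1 != 0) ∘ pvG)
      (List.range 29) = none := by
    apply List.find?_eq_none.mpr
    intro i hi
    simp only [List.mem_range] at hi
    by_contra hne
    have hne' : PySem.Int.band flags ((1:Int) <<< i) ≠ 0 := by
      simpa [Function.comp, pvG] using hne
    have htb := (pv_band_bit flags i hi).mp hne'
    rw [h0] at htb
    simp at htb
  rw [hnone]
  rfl

-- A's value when bit k is the lowest set bit of pvR flags
lemma pv_A_some (flags : Int) (k m' : Nat) (hk29 : k < 29)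
    (hrep : pvR flags = 2^(k+1) * m' + 2^k) :
    parse_ship_mode flags = pvModeNames.getD k "" := by
  unfold parse_ship_mode
  rw [pv_items_eq, List.find?_map]
  have hfind : List.find? ((fun p => PySem.Int.band flags p.1 != 0) ∘ pvG)
      (List.range 29) = some k := by
    apply pv_find?_range 29 _ k hk29
    · intro j hj
      have hbit : (pvR flags).testBit j = false := by
        rw [hrep, Nat.testBit_two_pow_mul_add m' (Nat.pow_lt_pow_succ (by norm_num)) j]
        simp only [if_pos (by omega : j < k + 1)]
        rw [Nat.testBit_two_pow]
        simp
        omega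
      have hb0 : PySem.Int.band flags ((1:Int) <<< j) = 0 := by
        by_contra hne
        have := (pv_band_bit flags j (by omega)).mp hne
        rw [hbit] at this
        cases this
      simp [Function.comp, pvG, hb0]
    · have hbit : (pvR flags).testBit k = true := by
        rw [hrep, Nat.testBit_two_pow_mul_add m' (Nat.pow_lt_pow_succ (by norm_num)) k]
        simp [Nat.testBit_two_pow]
      have := (pv_band_bit flags k hk29).mpr hbit
      simpa [Function.comp, pvG] using this
  rw [hfind]
  rfl

-- B's value in the two cases
lemma pv_B_zero (flags : Int) (h0 : pvR flags = 0) : parse_ship_mode_alt flags = "Unknown" := by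
  unfold parse_ship_mode_alt
  rw [pv_band_mask_eq, h0]
  rfl

lemma pv_B_some (flags : Int) (k m' : Nat) (hk29 : k < 29)
    (hrep : pvR flags = 2^(k+1) * m' + 2^k) :
    parse_ship_mode_alt flags = pvModeNames.getD k "" := by
  unfold parse_ship_mode_alt
  rw [pv_band_mask_eq]
  set r := pvR flags with hr
  have hrep2 : r = 2^(k+1) * m' + 2^k := by rw [hr]; exact hrep
  have hrpos : 0 < r := by
    rw [hrep2]
    exact Nat.lt_of_lt_of_le (Nat.two_pow_pos k) (Nat.le_add_left _ _)
  have hrne : ((r : Nat) : Int) ≠ 0 := by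
    simp
    omega
  have hneg : ¬ (0 ≤ -((r : Nat) : Int)) := by omega
  show (if ((r : Nat) : Int) = 0 then "Unknown"
    else PySem.List.pyGetD pvModeNames
      ((PySem.Int.bitLength (PySem.Int.band ((r : Nat) : Int) (-((r : Nat) : Int))) : Int) - 1) "")
    = pvModeNames.getD k ""
  rw [if_neg hrne, pv_band_branch_mixed r _ hneg]
  have harg : (-(-((r : Nat) : Int)) - 1).toNat = r - 1 := by
    simp
  rw [harg, hrep, pv_and_pred k m']
  have hsub : 2^(k+1) * m' + 2^k - 2^(k+1) * m' = 2^k := Nat.add_sub_cancel_left _ _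
  rw [hsub, pv_bitLength_two_pow k]
  have hidx : ((k + 1 : Nat) : Int) - 1 = ((k : Nat) : Int) := by push_cast; ring
  rw [hidx, PySem.List.pyGetD_natCast]

-- ===== VERDICT (by name: the statement is the Claim_ definition above) =====
theorem parse_ship_mode_spec : Claim_equal_parse_ship_mode := by
  intro flags _
  show parse_ship_mode flags = parse_ship_mode_alt flags
  by_cases h0 : pvR flags = 0
  · rw [pv_A_none flags h0, pv_B_zero flags h0]
  · obtain ⟨k, m, hodd, hrep⟩ := Nat.exists_eq_two_pow_mul_odd h0
    obtain ⟨m', rfl⟩ : ∃ m', m = 2 * m' + 1 := hodd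
    have hrep' : pvR flags = 2^(k+1) * m' + 2^k := by rw [hrep]; ring
    have hk29 : k < 29 := by
      have h1 : (2:Nat)^k ≤ pvR flags := by omega
      have h2 := lt_of_le_of_lt h1 (pv_pvR_lt flags)
      exact (Nat.pow_lt_pow_iff_right (by norm_num : 1 < 2)).mp h2
    rw [pv_A_some flags k m' hk29 hrep', pv_B_some flags k m' hk29 hrep']
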